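-- pv_equiv track=rewrite | github.com/Kanma/piano_fingering | piano_fingering/fingering.py | getAllFingerOptions
-- ===== SOURCE A (Python) =====
-- from copy import copy
--
-- def getAllFingerOptions(nb_fingers, left_or_right):
--     results = []
--     finger_options = [1, 2, 3, 4, 5]
--
--     def walk(nb_fingers, current_fingers, finger_options):
--         if len(current_fingers) == nb_fingers:
--             current = copy(current_fingers)
--             current.sort()
--             if left_or_right == 'left':
--                 current.reverse()
--             results.append(current)
--             return
--
--         for i in range(0, len(finger_options)):
--             current = current_fingers + [finger_options[i]]
--             walk(nb_fingers, current, finger_options[0:i])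
--
--     walk(nb_fingers, [], finger_options)
--
--     return results
-- ===== SOURCE B (Python) =====
-- def getAllFingerOptions(nb_fingers, left_or_right):
--     results = []
--     for mask in range(1 << 5):
--         fingers = [i + 1 for i in range(5) if (mask >> i) & 1]
--         if len(fingers) == nb_fingers:
--             if left_or_right == 'left':
--                 fingers.reverse()
--             results.append(fingers)
--     return results
-- ===== Notes on version B (the rewrite author's own statement) =====
-- stated objective: simpler
-- what changed: Replaces the nested recursive walk (with per-leaf copy/sort/reverse) by a flat loop over the 32 bitmasks of {1..5}; increasing mask order is colexicographic subset order, which reproduces A's output order with no recursion and no sorting.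
import Mathlib
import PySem

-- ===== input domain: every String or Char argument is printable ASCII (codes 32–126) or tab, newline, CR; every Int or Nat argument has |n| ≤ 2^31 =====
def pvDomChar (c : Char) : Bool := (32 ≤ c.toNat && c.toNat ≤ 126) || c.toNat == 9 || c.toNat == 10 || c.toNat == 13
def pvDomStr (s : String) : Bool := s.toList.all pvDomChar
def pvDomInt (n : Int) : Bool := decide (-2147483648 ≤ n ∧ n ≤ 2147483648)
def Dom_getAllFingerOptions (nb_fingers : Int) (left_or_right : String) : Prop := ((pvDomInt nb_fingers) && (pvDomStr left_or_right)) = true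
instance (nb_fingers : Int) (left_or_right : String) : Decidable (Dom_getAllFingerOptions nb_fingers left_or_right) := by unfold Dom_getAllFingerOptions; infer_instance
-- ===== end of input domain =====

-- B replaces A's nested recursive walk by one flat loop over the 32 bitmasks of {1..5} (simpler; no recursion, no sorting).

-- ===== PORT A =====
-- inner recursive 'walk'. The Nat fuel is only a totality guard (each call recurses on the
-- strictly shorter prefix finger_options[0:i], so fuel = len(finger_options)+1 is never exhausted).
def pvWalkA : Nat → Int → String → List Int → List Int → List (List Int)
  | 0, _, _, _, _ => []
  | fuel + 1, nb_fingers, left_or_right, current_fingers, finger_options =>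
    if (current_fingers.length : Int) = nb_fingers then
      -- current = copy(current_fingers); current.sort(); reversed if 'left'; results.append(current)
      let current := PySem.List.sorted current_fingers (fun x => x) false
      [if left_or_right = "left" then current.reverse else current]
    else
      (List.range finger_options.length).foldl
        (fun acc i =>
          acc ++ pvWalkA fuel nb_fingers left_or_right
                  (current_fingers ++ [PySem.List.pyGetD finger_options (i : Int) 0])
                  (PySem.List.slice finger_options (some 0) (some (i : Int))))
        []

def getAllFingerOptions (nb_fingers : Int) (left_or_right : String) : List (List Int) :=
  pvWalkA 6 nb_fingers left_or_right [] [1, 2, 3, 4, 5]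

-- ===== PORT B =====
def getAllFingerOptions_alt (nb_fingers : Int) (left_or_right : String) : List (List Int) :=
  (PySem.List.pyRange 0 32 1).foldl
    (fun results mask =>
      -- fingers = [i + 1 for i in range(5) if (mask >> i) & 1]; for 0 ≤ mask this is
      -- exactly mask // 2^i % 2 == 1
      let fingers := ((PySem.List.pyRange 0 5 1).filter
          (fun i => PySem.Int.mod (PySem.Int.floordiv mask (2 ^ i.toNat)) 2 == 1)).map (fun i => i + 1)
      if (fingers.length : Int) = nb_fingers then
        results ++ [if left_or_right = "left" then fingers.reverse else fingers]
      else results)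
    []

-- ===== PRECONDITION & SPEC =====
def Spec_getAllFingerOptions (nb_fingers : Int) (left_or_right : String) (out : List (List Int)) : Prop := out = getAllFingerOptions_alt nb_fingers left_or_right
instance (nb_fingers : Int) (left_or_right : String) (out : List (List Int)) : Decidable (Spec_getAllFingerOptions nb_fingers left_or_right out) := by unfold Spec_getAllFingerOptions; infer_instance

-- ===== CLAIM (what is proved, stated in full; the proofs are below) =====
def Claim_equal_getAllFingerOptions : Prop := ∀ (nb_fingers : Int) (left_or_right : String), Dom_getAllFingerOptions nb_fingers left_or_right → Spec_getAllFingerOptions nb_fingers left_or_right (getAllFingerOptions nb_fingers left_or_right)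

-- ===== LEMMAS AND PROOFS =====

theorem pv_foldl_congr {α β : Type} (f g : β → α → β) (l : List α) (init : β)
    (h : ∀ r m, m ∈ l → f r m = g r m) : l.foldl f init = l.foldl g init := by
  induction l generalizing init with
  | nil => rfl
  | cons x xs ih =>
    simp only [List.foldl_cons, h init x (by simp)]
    exact ih (g init x) (fun r m hm => h r m (by simp [hm]))

theorem pv_foldl_fix {α β : Type} (g : β → α → β) (l : List α) (init : β)
    (h : ∀ r m, m ∈ l → g r m = r) : l.foldl g init = init := by
  induction l generalizing init with
  | nil => rfl
  | cons x xs ih =>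
    simp only [List.foldl_cons, h init x (by simp)]
    exact ih init (fun r m hm => h r m (by simp [hm]))

-- The walk consults left_or_right only through the test 'lr = "left"'.
theorem pv_walk_ne_left (fuel : Nat) (nb : Int) (lr : String) (hl : lr ≠ "left") :
    ∀ (cur opts : List Int), pvWalkA fuel nb lr cur opts = pvWalkA fuel nb "right" cur opts := by
  induction fuel with
  | zero => intro cur opts; rfl
  | succ n ih =>
    intro cur opts
    simp only [pvWalkA]
    split
    · split <;> simp_all
    · exact pv_foldl_congr _ _ _ _ (fun r i _ => by rw [ih])

theorem pv_alt_ne_left (nb : Int) (lr : String) (hl : lr ≠ "left") :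
    getAllFingerOptions_alt nb lr = getAllFingerOptions_alt nb "right" := by
  simp only [getAllFingerOptions_alt]
  exact pv_foldl_congr _ _ _ _ (fun r mask _ => by simp [hl])

-- Both sides return [] when nb_fingers is not one of the reachable lengths 0..5.
theorem pv_empty (nb : Int) (lr : String)
    (h0 : nb ≠ 0) (h1 : nb ≠ 1) (h2 : nb ≠ 2) (h3 : nb ≠ 3) (h4 : nb ≠ 4) (h5 : nb ≠ 5) :
    getAllFingerOptions nb lr = getAllFingerOptions_alt nb lr := by
  have e0 : ((0 : Int) = nb) = False := by simp [Ne.symm h0]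
  have e1 : ((1 : Int) = nb) = False := by simp [Ne.symm h1]
  have e2 : ((2 : Int) = nb) = False := by simp [Ne.symm h2]
  have e3 : ((3 : Int) = nb) = False := by simp [Ne.symm h3]
  have e4 : ((4 : Int) = nb) = False := by simp [Ne.symm h4]
  have e5 : ((5 : Int) = nb) = False := by simp [Ne.symm h5]
  have hA : getAllFingerOptions nb lr = [] := by
    simp [getAllFingerOptions, pvWalkA, e0, e1, e2, e3, e4, e5]
  have hB : getAllFingerOptions_alt nb lr = [] := by
    unfold getAllFingerOptions_alt
    apply pv_foldl_fix
    intro r m _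
    rw [if_neg]
    intro hc
    have hle : (List.map (fun i => i + 1)
        ((PySem.List.pyRange 0 5 1).filter
          (fun i => PySem.Int.mod (PySem.Int.floordiv m (2 ^ i.toNat)) 2 == 1))).length ≤ 5 := by
      rw [List.length_map]
      exact le_trans (List.length_filter_le _ _) (by simp [PySem.List.pyRange])
    omega
  rw [hA, hB]

-- For each fixed nb_fingers in 0..5, with 'lr = "left"' resolved either way, both sides
-- evaluate to the same closed list.
theorem pv_fixed (nb : Int) (lr : String) (hnb : nb = 0 ∨ nb = 1 ∨ nb = 2 ∨ nb = 3 ∨ nb = 4 ∨ nb = 5) :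
    getAllFingerOptions nb lr = getAllFingerOptions_alt nb lr := by
  by_cases hl : lr = "left"
  · subst hl
    rcases hnb with h | h | h | h | h | h <;> subst h <;> decide
  · have hA : getAllFingerOptions nb lr = getAllFingerOptions nb "right" := by
      unfold getAllFingerOptions
      exact pv_walk_ne_left 6 nb lr hl [] [1, 2, 3, 4, 5]
    rw [hA, pv_alt_ne_left nb lr hl]
    rcases hnb with h | h | h | h | h | h <;> subst h <;> decide

-- ===== VERDICT (by name: the statement is the Claim_ definition above) =====
theorem getAllFingerOptions_spec : Claim_equal_getAllFingerOptions := by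
  intro nb lr _
  unfold Spec_getAllFingerOptions
  by_cases h0 : nb = 0
  · exact pv_fixed nb lr (Or.inl h0)
  by_cases h1 : nb = 1
  · exact pv_fixed nb lr (Or.inr (Or.inl h1))
  by_cases h2 : nb = 2
  · exact pv_fixed nb lr (Or.inr (Or.inr (Or.inl h2)))
  by_cases h3 : nb = 3
  · exact pv_fixed nb lr (Or.inr (Or.inr (Or.inr (Or.inl h3))))
  by_cases h4 : nb = 4
  · exact pv_fixed nb lr (Or.inr (Or.inr (Or.inr (Or.inr (Or.inl h4)))))
  by_cases h5 : nb = 5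
  · exact pv_fixed nb lr (Or.inr (Or.inr (Or.inr (Or.inr (Or.inr h5)))))
  exact pv_empty nb lr h0 h1 h2 h3 h4 h5
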